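-- pv_equiv track=rewrite | github.com/bobatea02-tech/petcare-companion | app/services/ai_service.py | _fallback_compression
-- ===== SOURCE A (Python) =====
-- def _fallback_compression(knowledge_base: str) -> str:
--     """
--     Fallback compression method when ScaleDown API is unavailable.
--
--     Args:
--         knowledge_base: Full veterinary knowledge base text
--
--     Returns:
--         Compressed knowledge base using simple algorithm
--     """
--     # Split into sentences and prioritize medical terms
--     sentences = knowledge_base.split('. ')
--
--     # Priority keywords for veterinary knowledge
--     priority_keywords = [
--         'emergency', 'toxic', 'poisonous', 'lethal', 'fatal', 'urgent',
--         'symptom', 'diagnosis', 'treatment', 'medication', 'dosage',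
--         'veterinarian', 'clinic', 'surgery', 'infection', 'disease',
--         'allergy', 'reaction', 'breathing', 'heart', 'temperature',
--         'vomiting', 'diarrhea', 'seizure', 'bleeding', 'pain'
--     ]
--
--     # Score sentences based on medical relevance
--     scored_sentences = []
--     for sentence in sentences:
--         score = sum(1 for keyword in priority_keywords
--                    if keyword.lower() in sentence.lower())
--         scored_sentences.append((sentence, score))
--
--     # Sort by score and keep top 25% (75% compression)
--     scored_sentences.sort(key=lambda x: x[1], reverse=True)
--     keep_count = max(1, len(scored_sentences) // 4)
--
--     compressed_sentences = [sent[0] for sent in scored_sentences[:keep_count]]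
--     return '. '.join(compressed_sentences)
-- ===== SOURCE B (Python) =====
-- PRIORITY_KEYWORDS = [
--     'emergency', 'toxic', 'poisonous', 'lethal', 'fatal', 'urgent',
--     'symptom', 'diagnosis', 'treatment', 'medication', 'dosage',
--     'veterinarian', 'clinic', 'surgery', 'infection', 'disease',
--     'allergy', 'reaction', 'breathing', 'heart', 'temperature',
--     'vomiting', 'diarrhea', 'seizure', 'bleeding', 'pain'
-- ]
--
--
-- def _fallback_compression(knowledge_base: str) -> str:
--     # Bucket (counting) sort by keyword score: one pass to fill score buckets,
--     # then concatenate buckets from highest score to lowest (stable, like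
--     # a reverse=True stable sort), keep the top quarter.
--     sentences = knowledge_base.split('. ')
--     buckets = [[] for _ in range(len(PRIORITY_KEYWORDS) + 1)]
--     for sentence in sentences:
--         low = sentence.lower()
--         score = sum(1 for kw in PRIORITY_KEYWORDS if kw in low)
--         buckets[score].append(sentence)
--     ordered = [s for bucket in reversed(buckets) for s in bucket]
--     keep = max(1, len(sentences) // 4)
--     return '. '.join(ordered[:keep])
-- ===== Notes on version B (the rewrite author's own statement) =====
-- stated objective: faster
-- what changed: Replaces A's stable reverse comparison sort of (sentence, score) pairs by a single-pass bucket (counting) sort: each sentence is appended to the bucket of its keyword score (0..26) and the buckets are concatenated from highest score to lowest, which reproduces the stable reverse=True order.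
import Mathlib
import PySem

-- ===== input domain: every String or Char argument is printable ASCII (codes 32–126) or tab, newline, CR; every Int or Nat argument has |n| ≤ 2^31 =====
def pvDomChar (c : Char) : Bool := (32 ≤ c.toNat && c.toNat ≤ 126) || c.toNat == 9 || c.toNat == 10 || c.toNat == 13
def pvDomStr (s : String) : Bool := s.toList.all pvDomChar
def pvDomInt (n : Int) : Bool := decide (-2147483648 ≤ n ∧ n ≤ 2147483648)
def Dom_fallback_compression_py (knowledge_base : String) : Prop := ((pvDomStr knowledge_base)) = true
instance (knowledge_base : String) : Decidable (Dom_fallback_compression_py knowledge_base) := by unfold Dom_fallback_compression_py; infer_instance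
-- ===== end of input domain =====

-- B replaces A's stable reverse comparison sort by a bucket (counting) sort over the 27 possible
-- keyword scores; same return value, alternative algorithm.

-- ===== PORT A =====
-- the priority_keywords list (shared literal of both programs)
def pvKeywords : List (List Char) :=
  ["emergency".toList, "toxic".toList, "poisonous".toList, "lethal".toList, "fatal".toList, "urgent".toList,
   "symptom".toList, "diagnosis".toList, "treatment".toList, "medication".toList, "dosage".toList,
   "veterinarian".toList, "clinic".toList, "surgery".toList, "infection".toList, "disease".toList,
   "allergy".toList, "reaction".toList, "breathing".toList, "heart".toList, "temperature".toList,
   "vomiting".toList, "diarrhea".toList, "seizure".toList, "bleeding".toList, "pain".toList]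

-- score = sum(1 for keyword in priority_keywords if keyword.lower() in sentence.lower())
def pvScoreA (sentence : List Char) : Int :=
  pvKeywords.foldl
    (fun acc keyword =>
      if PySem.Chars.isIn (PySem.Chars.lower keyword) (PySem.Chars.lower sentence) then acc + 1 else acc)
    0

def fallback_compression_py (knowledge_base : String) : String :=
  let sentences := PySem.Chars.splitOn knowledge_base.toList ('.' :: [' '])
  let scored_sentences :=
    sentences.foldl (fun acc sentence => acc ++ [(sentence, pvScoreA sentence)])
      ([] : List (List Char × Int))
  let scored_sorted := PySem.List.sorted scored_sentences (fun x => x.2) true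
  let keep_count : Int := max 1 (PySem.Int.floordiv (scored_sorted.length : Int) 4)
  let compressed_sentences :=
    (PySem.List.slice scored_sorted none (some keep_count)).map (fun sent => sent.1)
  String.ofList (PySem.Chars.join ('.' :: [' ']) compressed_sentences)

-- ===== PORT B =====
def fallback_compression_py_alt (knowledge_base : String) : String :=
  let sentences := PySem.Chars.splitOn knowledge_base.toList ('.' :: [' '])
  let buckets :=
    sentences.foldl
      (fun bs sentence =>
        let low := PySem.Chars.lower sentence
        let score : Int :=
          pvKeywords.foldl (fun acc kw => if PySem.Chars.isIn kw low then acc + 1 else acc) 0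
        bs.modify score.toNat (fun b => b ++ [sentence]))
      (List.replicate (pvKeywords.length + 1) ([] : List (List Char)))
  let ordered := buckets.reverse.flatten
  let keep := max 1 (sentences.length / 4)
  String.ofList (PySem.Chars.join ('.' :: [' ']) (ordered.take keep))

-- ===== PRECONDITION & SPEC =====
def Spec_fallback_compression_py (knowledge_base : String) (out : String) : Prop := out = fallback_compression_py_alt knowledge_base
instance (knowledge_base : String) (out : String) : Decidable (Spec_fallback_compression_py knowledge_base out) := by unfold Spec_fallback_compression_py; infer_instance

-- ===== CLAIM (what is proved, stated in full; the proofs are below) =====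
def Claim_equal_fallback_compression_py : Prop := ∀ (knowledge_base : String), Dom_fallback_compression_py knowledge_base → Spec_fallback_compression_py knowledge_base (fallback_compression_py knowledge_base)

-- ===== LEMMAS AND PROOFS =====

-- inserting behind a prefix none of whose elements the new element goes before
theorem pv_insertBy_append {α : Type} (before : α → α → Bool) (x : α) (l1 l2 : List α)
    (h : ∀ y ∈ l1, before x y = false) :
    PySem.List.insertBy before x (l1 ++ l2) = l1 ++ PySem.List.insertBy before x l2 := by
  induction l1 with
  | nil => simp
  | cons y ys ih =>
    simp only [List.cons_append, PySem.List.insertBy, h y (by simp)]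
    simp only [Bool.false_eq_true, if_false, List.cons.injEq, true_and]
    exact ih (fun z hz => h z (by simp [hz]))

-- inserting before a list every element of which the new element goes before
theorem pv_insertBy_all_before {α : Type} (before : α → α → Bool) (x : α) (l : List α)
    (h : ∀ y ∈ l, before x y = true) :
    PySem.List.insertBy before x l = x :: l := by
  cases l with
  | nil => simp [PySem.List.insertBy]
  | cons y ys => simp [PySem.List.insertBy, h y (by simp)]

theorem pv_sorted_rev_append_singleton {α : Type} (xs : List α) (x : α) (key : α → Int) :
    PySem.List.sorted (xs ++ [x]) key true
      = PySem.List.insertBy (fun a b => decide (key b < key a)) x (PySem.List.sorted xs key true) := by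
  simp [PySem.List.sorted_rev_eq_foldl_insertBy]

-- a stable descending sort is the concatenation of the score classes, taken along any
-- strictly decreasing list of values covering all keys
theorem pv_sorted_rev_buckets {α : Type} (key : α → Int) (vs : List Int)
    (hvs : vs.Pairwise (fun a b => b < a)) :
    ∀ xs : List α, (∀ x ∈ xs, key x ∈ vs) →
      PySem.List.sorted xs key true = vs.flatMap (fun v => xs.filter (fun x => key x == v)) := by
  intro xs
  induction xs using List.reverseRecOn with
  | nil => simp [PySem.List.sorted]
  | append_singleton xs x ih =>
    intro hmem
    have hx : key x ∈ vs := hmem x (by simp)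
    obtain ⟨vs1, vs2, hsplit⟩ := List.append_of_mem hx
    subst hsplit
    have hp := hvs
    rw [List.pairwise_append] at hp
    obtain ⟨hp1, hp2, hp12⟩ := hp
    have h1 : ∀ v ∈ vs1, key x < v := fun v hv => hp12 v hv (key x) (by simp)
    have h2 : ∀ v ∈ vs2, v < key x := fun v hv => (List.pairwise_cons.mp hp2).1 v hv
    rw [pv_sorted_rev_append_singleton, ih (fun y hy => hmem y (by simp [hy]))]
    rw [List.flatMap_append, List.flatMap_cons,
        List.flatMap_append (xs := vs1) (ys := key x :: vs2), List.flatMap_cons]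
    have hb1 : vs1.flatMap (fun v => (xs ++ [x]).filter (fun y => key y == v))
        = vs1.flatMap (fun v => xs.filter (fun y => key y == v)) := by
      refine List.flatMap_congr (fun v hv => ?_)
      have : (key x == v) = false := by simp [Int.ne_of_lt (h1 v hv)]
      simp [List.filter_append, this]
    have hb2 : vs2.flatMap (fun v => (xs ++ [x]).filter (fun y => key y == v))
        = vs2.flatMap (fun v => xs.filter (fun y => key y == v)) := by
      refine List.flatMap_congr (fun v hv => ?_)
      have : (key x == v) = false := by simp [Int.ne_of_gt (h2 v hv)]
      simp [List.filter_append, this]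
    have hbk : (xs ++ [x]).filter (fun y => key y == key x)
        = xs.filter (fun y => key y == key x) ++ [x] := by
      simp [List.filter_append]
    rw [hb1, hb2, hbk, ← List.append_assoc]
    rw [pv_insertBy_append _ x
          (vs1.flatMap (fun v => xs.filter (fun y => key y == v))
            ++ xs.filter (fun y => key y == key x))
          (vs2.flatMap (fun v => xs.filter (fun y => key y == v)))
          ?_, pv_insertBy_all_before _ x _ ?_]
    · simp
    · intro y hy
      rw [List.mem_flatMap] at hy
      obtain ⟨v, hv, hyf⟩ := hy
      rw [List.mem_filter] at hyf
      have hk : key y = v := by simpa using hyf.2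
      simp [hk, h2 v hv]
    · intro y hy
      rw [List.mem_append] at hy
      rcases hy with hy | hy
      · rw [List.mem_flatMap] at hy
        obtain ⟨v, hv, hyf⟩ := hy
        rw [List.mem_filter] at hyf
        have hk : key y = v := by simpa using hyf.2
        simp [hk, not_lt.mpr (le_of_lt (h1 v hv))]
      · rw [List.mem_filter] at hy
        have hk : key y = key x := by simpa using hy.2
        simp [hk]

-- the bucket-filling fold produces exactly the per-score filters
theorem pv_buckets_fold {α : Type} (idx : α → Nat) (n : Nat) :
    ∀ xs : List α, (∀ x ∈ xs, idx x < n) →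
      xs.foldl (fun bs x => bs.modify (idx x) (fun b => b ++ [x]))
          (List.replicate n ([] : List α))
        = (List.range n).map (fun v => xs.filter (fun x => idx x == v)) := by
  intro xs
  induction xs using List.reverseRecOn with
  | nil =>
    intro _
    apply List.ext_getElem <;> simp
  | append_singleton xs x ih =>
    intro hmem
    rw [List.foldl_append, List.foldl_cons, List.foldl_nil, ih (fun y hy => hmem y (by simp [hy]))]
    apply List.ext_getElem
    · simp
    · intro j hj hj'
      have hjn : j < n := by simpa using hj'
      rw [List.getElem_modify]
      simp only [List.getElem_map, List.getElem_range, List.filter_append]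
      by_cases h : idx x = j
      · simp [h]
      · simp [h]

theorem pv_lower_keywords : ∀ k ∈ pvKeywords, PySem.Chars.lower k = k := by decide

-- A's per-sentence score equals B's, and both are the keyword count
theorem pv_score_eq (s : List Char) :
    pvScoreA s
      = pvKeywords.foldl
          (fun acc kw => if PySem.Chars.isIn kw (PySem.Chars.lower s) then acc + 1 else acc) 0 := by
  unfold pvScoreA
  exact PySem.List.foldl_congr_mem _ _ _ _
    (fun acc k hk => by rw [pv_lower_keywords k hk])

theorem pv_score_count (s : List Char) :
    pvScoreA s = (pvKeywords.countP (fun kw => PySem.Chars.isIn kw (PySem.Chars.lower s)) : Int) := by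
  rw [pv_score_eq, PySem.List.foldl_if_add_one]
  simp

theorem pv_score_bounds (s : List Char) :
    0 ≤ pvScoreA s ∧ pvScoreA s ≤ 26 := by
  rw [pv_score_count]
  have h := List.countP_le_length (l := pvKeywords)
    (p := fun kw => PySem.Chars.isIn kw (PySem.Chars.lower s))
  have : pvKeywords.length = 26 := by decide
  omega

-- the descending value list used for the buckets
def pvVals : List Int := ((List.range 27).reverse).map Int.ofNat

theorem pv_vals_pairwise : pvVals.Pairwise (fun a b => b < a) := by decide

-- membership of a bounded score in the descending value list
theorem pv_mem_vals (c : Int) (h0 : 0 ≤ c) (h26 : c ≤ 26) : c ∈ pvVals := by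
  unfold pvVals
  rw [List.mem_map]
  exact ⟨c.toNat, by rw [List.mem_reverse, List.mem_range]; omega, by simp; omega⟩

-- B's inline score (on the pre-lowered sentence) as a function
def pvIdxB (s : List Char) : Nat :=
  (pvKeywords.foldl (fun acc kw => if PySem.Chars.isIn kw (PySem.Chars.lower s) then acc + 1 else acc)
    (0 : Int)).toNat

theorem pv_idxB_eq (s : List Char) : pvIdxB s = (pvScoreA s).toNat := by
  unfold pvIdxB
  rw [← pv_score_eq]

theorem pv_idxB_lt (s : List Char) : pvIdxB s < 27 := by
  have h := pv_score_bounds s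
  rw [pv_idxB_eq]
  omega

-- ===== VERDICT (by name: the statement is the Claim_ definition above) =====
theorem fallback_compression_py_spec : Claim_equal_fallback_compression_py := by
  intro kb _
  unfold Spec_fallback_compression_py fallback_compression_py fallback_compression_py_alt
  simp only [List.nil_append, PySem.List.foldl_append_singleton_eq_map]
  set sentences := PySem.Chars.splitOn kb.toList ('.' :: [' ']) with hsent
  set g : List Char → List Char × Int := fun s => (s, pvScoreA s) with hg
  -- A: the stable reverse sort is the concatenation of the score buckets, highest first
  have hsorted : PySem.List.sorted (sentences.map g) (fun x => x.2) true
      = pvVals.flatMap (fun v => (sentences.map g).filter (fun x => x.2 == v)) := by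
    refine pv_sorted_rev_buckets _ pvVals pv_vals_pairwise _ ?_
    intro p hp
    rw [List.mem_map] at hp
    obtain ⟨s, _, rfl⟩ := hp
    exact pv_mem_vals _ (pv_score_bounds s).1 (pv_score_bounds s).2
  -- B: the bucket fold is the per-score filters
  have hbuckets : sentences.foldl
        (fun bs sentence =>
          bs.modify
            ((pvKeywords.foldl
                (fun acc kw => if PySem.Chars.isIn kw (PySem.Chars.lower sentence) then acc + 1 else acc)
                (0 : Int)).toNat)
            (fun b => b ++ [sentence]))
        (List.replicate (pvKeywords.length + 1) ([] : List (List Char)))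
      = (List.range 27).map (fun v => sentences.filter (fun s => pvIdxB s == v)) := by
    have hlen : pvKeywords.length + 1 = 27 := by decide
    rw [hlen]
    exact pv_buckets_fold pvIdxB 27 sentences (fun s _ => pv_idxB_lt s)
  -- the two orderings agree element for element
  have hbucket : ∀ (i : Nat),
      ((sentences.map g).filter (fun x => x.2 == Int.ofNat i)).map Prod.fst
        = sentences.filter (fun s => pvIdxB s == i) := by
    intro i
    rw [List.filter_map, List.map_map]
    have hfst : (Prod.fst ∘ g) = id := by funext s; rfl
    rw [hfst, List.map_id]
    refine List.filter_congr (fun s _ => ?_)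
    have hb := pv_score_bounds s
    simp only [hg, pv_idxB_eq, Function.comp_apply, Int.ofNat_eq_natCast]
    rw [Bool.eq_iff_iff, beq_iff_eq, beq_iff_eq]
    omega
  have hlists : (pvVals.flatMap (fun v => (sentences.map g).filter (fun x => x.2 == v))).map Prod.fst
      = ((List.range 27).map (fun v => sentences.filter (fun s => pvIdxB s == v))).reverse.flatten := by
    rw [List.map_flatMap]
    rw [show pvVals = ((List.range 27).reverse).map Int.ofNat from rfl]
    rw [List.flatMap_map, ← List.map_reverse, ← List.flatMap_def]
    exact List.flatMap_congr (fun i _ => hbucket i)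
  -- lengths and the keep count
  have hlen : (PySem.List.sorted (sentences.map g) (fun x => x.2) true).length
      = sentences.length := by
    rw [(PySem.List.sorted_perm (sentences.map g) (fun x => x.2) true).length_eq, List.length_map]
  have hnn : (0:Int) ≤ max 1 (PySem.Int.floordiv
      (((PySem.List.sorted (sentences.map g) (fun x => x.2) true).length : Nat) : Int) 4) :=
    le_trans (by norm_num) (le_max_left _ _)
  rw [PySem.List.slice_to _ hnn]
  have htn : (max 1 (PySem.Int.floordiv
        (((PySem.List.sorted (sentences.map g) (fun x => x.2) true).length : Nat) : Int) 4)).toNat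
      = max 1 (sentences.length / 4) := by
    rw [hlen, show (4:Int) = ((4:Nat):Int) from rfl, PySem.Int.floordiv_natCast]
    omega
  rw [htn, hsorted, List.map_take, hlists, hbuckets]
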